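-- pv_equiv track=rewrite | github.com/theredbluepill/arc-interactive | devtools/similar_games_report.py | canonical_version
-- ===== SOURCE A (Python) =====
-- def _is_hex8(name: str) -> bool:
--     return len(name) == 8 and all(c in "0123456789abcdef" for c in name.lower())
--
-- def canonical_version(versions: list[str], policy: str) -> str:
--     """Pick one version dir name for a stem."""
--     if not versions:
--         raise ValueError("empty versions")
--     if len(versions) == 1:
--         return versions[0]
--     if policy == "first":
--         return sorted(versions, key=lambda s: s.lower())[0]
--     if policy == "last":
--         return sorted(versions, key=lambda s: s.lower())[-1]
--     if policy == "prefer_git_sha":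
--         hexes = [v for v in versions if _is_hex8(v)]
--         if hexes:
--             return sorted(hexes, key=lambda s: s.lower())[-1]
--         if "v1" in versions:
--             return "v1"
--         return sorted(versions, key=lambda s: s.lower())[-1]
--     raise ValueError(f"unknown policy {policy!r}")
-- ===== SOURCE B (Python) =====
-- def _is_hex8(name: str) -> bool:
--     return len(name) == 8 and all(c in "0123456789abcdef" for c in name.lower())
--
-- def _first_min_lower(xs):
--     best = xs[0]
--     bk = best.lower()
--     for x in xs[1:]:
--         k = x.lower()
--         if k < bk:
--             best, bk = x, k
--     return best
--
-- def _last_max_lower(xs):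
--     best = xs[0]
--     bk = best.lower()
--     for x in xs[1:]:
--         k = x.lower()
--         if k >= bk:
--             best, bk = x, k
--     return best
--
-- def canonical_version(versions: list[str], policy: str) -> str:
--     """Pick one version dir name for a stem."""
--     if not versions:
--         raise ValueError("empty versions")
--     if len(versions) == 1:
--         return versions[0]
--     if policy == "first":
--         return _first_min_lower(versions)
--     if policy == "last":
--         return _last_max_lower(versions)
--     if policy == "prefer_git_sha":
--         hexes = [v for v in versions if _is_hex8(v)]
--         if hexes:
--             return _last_max_lower(hexes)
--         if "v1" in versions:
--             return "v1"
--         return _last_max_lower(versions)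
--     raise ValueError(f"unknown policy {policy!r}")
-- ===== Notes on version B (the rewrite author's own statement) =====
-- stated objective: faster
-- what changed: Each sorted(xs, key=lower)[0]/[-1] selection is replaced by a single-pass scan that tracks the best element and its cached lowercase key (strict < for the first-min, >= so the last maximal element wins, matching stable-sort tie-breaking); no list is ever sorted.
import Mathlib
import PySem

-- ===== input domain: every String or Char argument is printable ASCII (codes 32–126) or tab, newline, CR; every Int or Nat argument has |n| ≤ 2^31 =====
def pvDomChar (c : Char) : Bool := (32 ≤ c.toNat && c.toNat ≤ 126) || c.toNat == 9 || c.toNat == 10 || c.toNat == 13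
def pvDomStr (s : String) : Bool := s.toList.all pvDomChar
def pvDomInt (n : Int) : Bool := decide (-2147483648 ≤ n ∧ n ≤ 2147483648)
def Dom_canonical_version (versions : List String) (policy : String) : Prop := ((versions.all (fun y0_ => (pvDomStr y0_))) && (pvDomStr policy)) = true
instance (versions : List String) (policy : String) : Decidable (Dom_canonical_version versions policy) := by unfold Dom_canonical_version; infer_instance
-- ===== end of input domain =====

-- B replaces each `sorted(..., key=lower)[0]`/`[-1]` by a single-pass selection scan with
-- Python-stable tie-breaking (objective: faster — O(n) selection instead of O(n log n) sorts).

-- ===== PORT A =====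
def pyIsHex8 (name : String) : Bool :=
  PySem.Str.len name == 8 &&
    (PySem.Str.lower name).toList.all (fun c => ("0123456789abcdef".toList).contains c)

def canonical_version (versions : List String) (policy : String) : String :=
  if versions.isEmpty then ""  -- Python: raise ValueError("empty versions") — excluded by Pre_
  else if versions.length == 1 then (PySem.List.pyGet? versions 0).getD ""
  else if policy == "first" then
    (PySem.List.pyGet? (PySem.List.sorted versions (fun s => PySem.Str.lower s)) 0).getD ""
  else if policy == "last" then
    (PySem.List.pyGet? (PySem.List.sorted versions (fun s => PySem.Str.lower s)) (-1)).getD ""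
  else if policy == "prefer_git_sha" then
    let hexes := versions.filter (fun v => pyIsHex8 v)
    if !hexes.isEmpty then
      (PySem.List.pyGet? (PySem.List.sorted hexes (fun s => PySem.Str.lower s)) (-1)).getD ""
    else if versions.contains "v1" then "v1"
    else (PySem.List.pyGet? (PySem.List.sorted versions (fun s => PySem.Str.lower s)) (-1)).getD ""
  else ""  -- Python: raise ValueError(f"unknown policy …") — excluded by Pre_

-- ===== PORT B =====
def firstMinLowerGo (best : String) (bk : String) (xs : List String) : String :=
  match xs with
  | [] => best
  | x :: rest =>
      let k := PySem.Str.lower x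
      if k < bk then firstMinLowerGo x k rest else firstMinLowerGo best bk rest

def lastMaxLowerGo (best : String) (bk : String) (xs : List String) : String :=
  match xs with
  | [] => best
  | x :: rest =>
      let k := PySem.Str.lower x
      if bk ≤ k then lastMaxLowerGo x k rest else lastMaxLowerGo best bk rest

def firstMinLower (xs : List String) : String :=
  match xs with
  | [] => ""  -- unreachable: every caller passes a nonempty list (Python xs[0] would raise)
  | x :: rest => firstMinLowerGo x (PySem.Str.lower x) rest

def lastMaxLower (xs : List String) : String :=
  match xs with
  | [] => ""  -- unreachable: every caller passes a nonempty list (Python xs[0] would raise)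
  | x :: rest => lastMaxLowerGo x (PySem.Str.lower x) rest

def canonical_version_alt (versions : List String) (policy : String) : String :=
  if versions.isEmpty then ""  -- Python: raise ValueError("empty versions") — excluded by Pre_
  else if versions.length == 1 then (PySem.List.pyGet? versions 0).getD ""
  else if policy == "first" then firstMinLower versions
  else if policy == "last" then lastMaxLower versions
  else if policy == "prefer_git_sha" then
    let hexes := versions.filter (fun v => pyIsHex8 v)
    if !hexes.isEmpty then lastMaxLower hexes
    else if versions.contains "v1" then "v1"
    else lastMaxLower versions
  else ""  -- Python: raise ValueError(f"unknown policy …") — excluded by Pre_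

-- ===== PRECONDITION & SPEC =====
-- Pre_ excludes exactly the inputs where A raises ValueError: the empty list, and an
-- unknown policy reached with two or more versions.
def Pre_canonical_version (versions : List String) (policy : String) : Prop :=
  versions ≠ [] ∧
    (versions.length = 1 ∨ policy = "first" ∨ policy = "last" ∨ policy = "prefer_git_sha")
instance (versions : List String) (policy : String) : Decidable (Pre_canonical_version versions policy) := by unfold Pre_canonical_version; infer_instance

def pvWitness_canonical_version : List String × String := (["b", "A"], "first")

def Spec_canonical_version (versions : List String) (policy : String) (out : String) : Prop := out = canonical_version_alt versions policy
instance (versions : List String) (policy : String) (out : String) : Decidable (Spec_canonical_version versions policy out) := by unfold Spec_canonical_version; infer_instance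

-- ===== CLAIM (what is proved, stated in full; the proofs are below) =====
def Claim_equal_canonical_version : Prop := ∀ (versions : List String) (policy : String), Dom_canonical_version versions policy → Pre_canonical_version versions policy → Spec_canonical_version versions policy (canonical_version versions policy)

-- ===== LEMMAS AND PROOFS =====

-- the stable-insertion step of PySem.List.sorted for the key `lower`
def insLow (acc : List String) (x : String) : List String :=
  PySem.List.insertBy (fun a b => decide (PySem.Str.lower a < PySem.Str.lower b)) x acc

lemma insLow_ne_nil (acc : List String) (x : String) : insLow acc x ≠ [] := by
  cases acc with
  | nil => simp [insLow, PySem.List.insertBy]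
  | cons y ys =>
      simp only [insLow, PySem.List.insertBy]
      split <;> simp


lemma head?_insLow (best : String) (t : List String) (x : String) :
    (insLow (best :: t) x).head? =
      some (if PySem.Str.lower x < PySem.Str.lower best then x else best) := by
  simp only [insLow, PySem.List.insertBy]
  split <;> rename_i h <;> simp at h <;> simp [h]


lemma insLow_pairwise (acc : List String) (x : String)
    (h : acc.Pairwise (fun a b => PySem.Str.lower a ≤ PySem.Str.lower b)) :
    (insLow acc x).Pairwise (fun a b => PySem.Str.lower a ≤ PySem.Str.lower b) := by
  induction acc with
  | nil => simp [insLow, PySem.List.insertBy]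
  | cons y ys ih =>
      rw [List.pairwise_cons] at h
      simp only [insLow, PySem.List.insertBy]
      split <;> rename_i hc <;> simp only [decide_eq_true_eq] at hc
      · exact List.pairwise_cons.mpr ⟨by
          intro z hz
          rcases List.mem_cons.mp hz with rfl | hz
          · exact le_of_lt hc
          · exact le_of_lt (lt_of_lt_of_le hc (h.1 z hz)),
          List.pairwise_cons.mpr h⟩
      · refine List.pairwise_cons.mpr ⟨?_, ih h.2⟩
        intro z hz
        rcases (PySem.List.mem_insertBy _ _ _ _).mp hz with rfl | hz
        · exact le_of_not_gt hc
        · exact h.1 z hz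


lemma key_le_getLast (y : String) (ys : List String) (b : String)
    (hp : (y :: ys).Pairwise (fun a b => PySem.Str.lower a ≤ PySem.Str.lower b))
    (hl : (y :: ys).getLast? = some b) : PySem.Str.lower y ≤ PySem.Str.lower b := by
  induction ys generalizing y with
  | nil => simp at hl; subst hl; exact le_rfl
  | cons z zs ih =>
      rw [List.getLast?_cons_cons] at hl
      rw [List.pairwise_cons] at hp
      exact le_trans (hp.1 z (List.mem_cons_self)) (ih z hp.2 hl)


lemma getLast?_insLow (acc : List String) (x : String) (best : String)
    (hp : acc.Pairwise (fun a b => PySem.Str.lower a ≤ PySem.Str.lower b))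
    (hl : acc.getLast? = some best) :
    (insLow acc x).getLast? =
      some (if PySem.Str.lower best ≤ PySem.Str.lower x then x else best) := by
  induction acc generalizing best with
  | nil => simp at hl
  | cons y ys ih =>
      simp only [insLow, PySem.List.insertBy]
      split <;> rename_i hc <;> simp only [decide_eq_true_eq] at hc
      · -- x prepended: x < y ≤ best, so the last element is unchanged
        have hyb : PySem.Str.lower y ≤ PySem.Str.lower best := key_le_getLast y ys best hp hl
        have : ¬ PySem.Str.lower best ≤ PySem.Str.lower x :=
          not_le.mpr (lt_of_lt_of_le hc hyb)
        rw [List.getLast?_cons_cons, hl, if_neg this]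
      · cases ys with
        | nil =>
            obtain rfl : y = best := by simpa using hl
            rw [show PySem.List.insertBy
                  (fun a b => decide (PySem.Str.lower a < PySem.Str.lower b)) x ([] : List String)
                  = [x] from rfl,
              List.getLast?_cons_cons, List.getLast?_singleton,
              if_pos (le_of_not_gt hc)]
        | cons z zs =>
            have h2 : (insLow (z :: zs) x).getLast? =
                some (if PySem.Str.lower best ≤ PySem.Str.lower x then x else best) :=
              ih best (List.pairwise_cons.mp hp).2 (by rwa [List.getLast?_cons_cons] at hl)
            have hne := insLow_ne_nil (z :: zs) x
            rw [show PySem.List.insertBy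
                  (fun a b => decide (PySem.Str.lower a < PySem.Str.lower b)) x (z :: zs)
                  = insLow (z :: zs) x from rfl]
            rcases hx : insLow (z :: zs) x with - | ⟨a, as⟩
            · exact absurd hx hne
            · rw [hx] at h2
              rw [List.getLast?_cons_cons]
              exact h2


lemma foldl_insLow_head? (rest : List String) :
    ∀ (best bk : String), bk = PySem.Str.lower best → ∀ (t : List String),
      ((rest.foldl insLow (best :: t)).head?) = some (firstMinLowerGo best bk rest) := by
  induction rest with
  | nil => intro best bk hbk t; simp [firstMinLowerGo]
  | cons x rest ih =>
      intro best bk hbk t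
      subst hbk
      rw [List.foldl_cons]
      rcases hx : insLow (best :: t) x with - | ⟨a, as⟩
      · exact absurd hx (insLow_ne_nil _ _)
      · have hthis := head?_insLow best t x
        rw [hx] at hthis
        simp only [List.head?_cons, Option.some.injEq] at hthis
        simp only [firstMinLowerGo]
        split <;> rename_i hcmp
        · rw [if_pos hcmp] at hthis; rw [hthis]
          exact ih x (PySem.Str.lower x) rfl as
        · rw [if_neg hcmp] at hthis; rw [hthis]
          exact ih best (PySem.Str.lower best) rfl as

lemma foldl_insLow_getLast? (rest : List String) :
    ∀ (best bk : String), bk = PySem.Str.lower best → ∀ (acc : List String),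
      acc.Pairwise (fun a b => PySem.Str.lower a ≤ PySem.Str.lower b) →
      acc.getLast? = some best →
      ((rest.foldl insLow acc).getLast?) = some (lastMaxLowerGo best bk rest) := by
  induction rest with
  | nil =>
      intro best bk hbk acc hp hl
      simpa [lastMaxLowerGo] using hl
  | cons x rest ih =>
      intro best bk hbk acc hp hl
      subst hbk
      rw [List.foldl_cons]
      have hstep := getLast?_insLow acc x best hp hl
      have hp' := insLow_pairwise acc x hp
      simp only [lastMaxLowerGo]
      split <;> rename_i hcmp
      · rw [if_pos hcmp] at hstep
        exact ih x (PySem.Str.lower x) rfl _ hp' hstep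
      · rw [if_neg hcmp] at hstep
        exact ih best (PySem.Str.lower best) rfl _ hp' hstep


lemma sorted_cons_foldl (v : String) (vs : List String) :
    PySem.List.sorted (v :: vs) (fun s => PySem.Str.lower s) = vs.foldl insLow [v] := by
  rw [PySem.List.sorted_eq_foldl_insertBy]
  rfl


lemma pyGet?_zero_getD (l : List String) (m : String) (h : l.head? = some m) :
    (PySem.List.pyGet? l 0).getD "" = m := by
  cases l with
  | nil => simp at h
  | cons a as =>
      simp only [List.head?_cons, Option.some.injEq] at h
      simp [PySem.List.pyGet?, PySem.List.pyIdx?, h]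

lemma sorted_head_eq_firstMin (v : String) (vs : List String) :
    (PySem.List.pyGet? (PySem.List.sorted (v :: vs) (fun s => PySem.Str.lower s)) 0).getD ""
      = firstMinLower (v :: vs) := by
  rw [sorted_cons_foldl]
  exact pyGet?_zero_getD _ _ (foldl_insLow_head? vs v (PySem.Str.lower v) rfl [])

lemma sorted_last_eq_lastMax (v : String) (vs : List String) :
    (PySem.List.pyGet? (PySem.List.sorted (v :: vs) (fun s => PySem.Str.lower s)) (-1)).getD ""
      = lastMaxLower (v :: vs) := by
  rw [sorted_cons_foldl, PySem.List.pyGet?_neg_one]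
  rw [foldl_insLow_getLast? vs v (PySem.Str.lower v) rfl [v] (by simp) (by simp)]
  rfl


-- ===== VERDICT (by name: the statement is the Claim_ definition above) =====
theorem canonical_version_spec : Claim_equal_canonical_version := by
  intro versions policy _hdom hpre
  unfold Spec_canonical_version
  obtain ⟨hne, _⟩ := hpre
  unfold canonical_version canonical_version_alt
  obtain ⟨v, vs, rfl⟩ : ∃ v vs, versions = v :: vs := by
    cases versions with
    | nil => exact absurd rfl hne
    | cons v vs => exact ⟨v, vs, rfl⟩
  dsimp only
  split_ifs with h1 h2 h3 h4 h5 h6 h7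
  · rfl
  · rfl
  · exact sorted_head_eq_firstMin v vs
  · exact sorted_last_eq_lastMax v vs
  · -- hexes nonempty
    rcases hh : List.filter (fun v => pyIsHex8 v) (v :: vs) with - | ⟨a, as⟩
    · rw [hh] at h6; simp at h6
    · exact sorted_last_eq_lastMax a as
  · rfl
  · exact sorted_last_eq_lastMax v vs
  · rfl
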